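-- pv_equiv track=rewrite | github.com/jinhyeok15/python-examples | programmers/표현가능한 이진트리.py | solution
-- ===== SOURCE A (Python) =====
-- def binsearch(binstr, status):
--     _length = len(binstr)
--     if _length == 1 or len(set(binstr)) == 1:
--         return
--
--     mid = _length // 2
--     if binstr[mid] == '0':
--         status[0] = 0
--         return
--
--     binsearch(binstr[:mid], status)
--     binsearch(binstr[mid+1:], status)
--
-- def solution(numbers):
--     answer = []
--     bin_list = [2**x - 1 for x in range(50)]
--
--     for num in numbers:
--         binstr = format(num, 'b')
--         _length = len(binstr)
--         for size in bin_list :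
--             if size >= _length :
--                 binstr = '0'*(size-_length) + binstr
--                 break
--         status = [1]
--         binsearch(binstr, status)
--         answer += status
--     return answer
-- ===== SOURCE B (Python) =====
-- _BIN_LIST = [2**x - 1 for x in range(50)]
--
-- def check(num):
--     binstr = format(num, 'b')
--     _length = len(binstr)
--     for size in _BIN_LIST:
--         if size >= _length:
--             binstr = '0' * (size - _length) + binstr
--             break
--     ok = 1
--     stack = [(0, len(binstr))]
--     while stack:
--         lo, hi = stack.pop()
--         n = hi - lo
--         if n == 1 or binstr.count(binstr[lo], lo, hi) == n:
--             continue
--         mid = lo + n // 2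
--         if binstr[mid] == '0':
--             ok = 0
--             break
--         stack.append((lo, mid))
--         stack.append((mid + 1, hi))
--     return ok
--
-- def solution(numbers):
--     return [check(num) for num in numbers]
-- ===== Notes on version B (the rewrite author's own statement) =====
-- stated objective: alternative
-- what changed: A's recursive helper mutating a one-cell status list (recursing on fresh string slices) is replaced by an iterative drain of an explicit stack of (lo, hi) index ranges over the padded string, using an in-place character count instead of set() for the all-equal test and breaking early at the first bad node; the answer is built per number by a comprehension instead of answer += status.
import Mathlib
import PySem

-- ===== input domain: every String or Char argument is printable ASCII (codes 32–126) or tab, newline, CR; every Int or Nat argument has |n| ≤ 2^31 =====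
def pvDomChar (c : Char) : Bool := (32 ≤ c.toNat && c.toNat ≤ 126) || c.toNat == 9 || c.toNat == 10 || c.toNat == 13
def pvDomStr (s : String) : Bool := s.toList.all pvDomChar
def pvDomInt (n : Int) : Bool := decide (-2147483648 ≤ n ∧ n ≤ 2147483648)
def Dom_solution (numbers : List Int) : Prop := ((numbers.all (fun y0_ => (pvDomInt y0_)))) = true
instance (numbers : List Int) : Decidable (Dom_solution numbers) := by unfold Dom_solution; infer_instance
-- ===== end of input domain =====

-- B replaces A's recursive helper (mutating a status cell) with an iterative drain of an explicit
-- stack of index ranges over the padded string; same return value, no mutation involved.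

-- ===== PORT A =====
-- termination facts for the ports, cited by name in decreasing_by (kept above the ports for that reason)
theorem natBinDec (n : Nat) : (n + 1) / 2 < n + 1 := Nat.div_lt_self (Nat.succ_pos n) Nat.one_lt_two

theorem pyTakeDec (b : List Char) (hb : ¬ b = []) : (b.take (b.length / 2)).length < b.length := by
  rw [List.length_take]
  exact min_lt_of_left_lt (Nat.div_lt_self (List.length_pos_iff.mpr hb) Nat.one_lt_two)

theorem pyDropDec (b : List Char) (hb : ¬ b = []) : (b.drop (b.length / 2 + 1)).length < b.length := by
  rw [List.length_drop]
  exact Nat.sub_lt (List.length_pos_iff.mpr hb) (Nat.succ_pos _)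

-- format(num, 'b'): binary digits of |num|, '-'-prefixed if negative (builtin, shared by both ports)
def natBin : Nat → List Char
  | 0 => []
  | n + 1 => natBin ((n + 1) / 2) ++ [if (n + 1) % 2 = 1 then '1' else '0']
termination_by n => n
decreasing_by exact natBinDec n

def pyFormatB (n : Int) : List Char :=
  if n < 0 then '-' :: natBin (-n).toNat
  else if n = 0 then ['0'] else natBin n.toNat

-- the padding loop 'for size in bin_list: if size >= _length: … break' (textually identical in A and in Source B)
def padLoop : List Int → List Char → List Char
  | [], b => b
  | size :: rest, b =>
    if size ≥ (b.length : Int) then List.replicate (size - (b.length : Int)).toNat '0' ++ b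
    else padLoop rest b

-- binstr = format(num,'b') padded by the loop over bin_list = [2**x - 1 for x in range(50)]
def padBin (num : Int) : List Char :=
  padLoop ((PySem.List.pyRange 0 50 1).map (fun x => (2 : Int) ^ x.toNat - 1)) (pyFormatB num)

-- A's recursive helper; the mutable cell status[0] is threaded as the Int argument/result.
-- binstr[:mid] / binstr[mid+1:] are take/drop (nonneg in-range bounds: PySem.List.slice_to_natCast /
-- slice_from_natCast); binstr[mid] is ported as getD — mid = len // 2 is in range whenever b ≠ [];
-- the 'b = []' guard only makes the recursion total (Python's binsearch('') would raise IndexError,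
-- unreachable from solution, whose strings all have length 2^k - 1).
def binsearch (b : List Char) (status : Int) : Int :=
  if b.length = 1 ∨ (PySem.Set.ofList b).length = 1 then status
  else if b = [] then status
  else
    let mid := b.length / 2
    if b.getD mid ' ' = '0' then 0
    else binsearch (b.drop (mid + 1)) (binsearch (b.take mid) status)
termination_by b.length
decreasing_by
  · rename_i hb _; exact pyTakeDec b hb
  · rename_i hb _; exact pyDropDec b hb

def solution (numbers : List Int) : List Int :=
  numbers.foldl (fun answer num => answer ++ [binsearch (padBin num) 1]) []

-- ===== PORT B =====
-- binstr.count(binstr[lo], lo, hi) == n: occurrences of that character in binstr[lo:hi] (exact for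
-- a one-character needle); binstr[lo] ported as getD (lo is in range whenever the slice is nonempty)
def allSeg (s : List Char) (lo hi : Nat) : Bool :=
  ((s.drop lo).take (hi - lo)).count (s.getD lo ' ') == hi - lo

theorem allSeg_false_lt {s : List Char} {lo hi : Nat} (h : ¬ allSeg s lo hi = true) :
    lo + 1 ≤ hi := by
  by_contra hc
  apply h
  unfold allSeg
  rw [Nat.sub_eq_zero_of_le (Nat.le_of_not_lt hc), List.take_zero]
  rfl

theorem pushCore (n m S : Nat) (h1 : m + 1 ≤ n) :
    2 * (n - (m + 1)) + 1 + (2 * m + 1 + S) < 2 * n + 1 + S := by omega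

theorem drainDecSkip (lo hi : Nat) (rest : List (Nat × Nat)) :
    (rest.map (fun p => 2 * (p.2 - p.1) + 1)).sum <
      (((lo, hi) :: rest).map (fun p => 2 * (p.2 - p.1) + 1)).sum := by
  rw [List.map_cons, List.sum_cons]
  exact Nat.lt_add_of_pos_left (Nat.succ_pos _)

theorem drainDecPush (s : List Char) (lo hi : Nat) (rest : List (Nat × Nat))
    (h : ¬ (hi - lo = 1 ∨ allSeg s lo hi = true)) :
    ((((lo + (hi - lo) / 2 + 1, hi) :: (lo, lo + (hi - lo) / 2) :: rest).map
        (fun p => 2 * (p.2 - p.1) + 1)).sum) <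
      (((lo, hi) :: rest).map (fun p => 2 * (p.2 - p.1) + 1)).sum := by
  have h2 : lo + 1 ≤ hi := allSeg_false_lt (fun hh => h (Or.inr hh))
  have hpos : 0 < hi - lo := Nat.sub_pos_of_lt h2
  have hmlt : (hi - lo) / 2 + 1 ≤ hi - lo :=
    Nat.succ_le_of_lt (Nat.div_lt_self hpos Nat.one_lt_two)
  simp only [List.map_cons, List.sum_cons]
  rw [Nat.add_sub_cancel_left, Nat.add_assoc lo ((hi - lo) / 2) 1, ← Nat.sub_sub]
  exact pushCore (hi - lo) ((hi - lo) / 2) _ hmlt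

-- the 'while stack:' loop of Source B; pop = head, the two appends put (mid+1, hi) on top
def drain (s : List Char) (stack : List (Nat × Nat)) (ok : Int) : Int :=
  match stack with
  | [] => ok
  | (lo, hi) :: rest =>
    let n := hi - lo
    if n = 1 ∨ allSeg s lo hi then drain s rest ok
    else
      let mid := lo + n / 2
      if s.getD mid ' ' = '0' then 0
      else drain s ((mid + 1, hi) :: (lo, mid) :: rest) ok
termination_by (stack.map (fun p => 2 * (p.2 - p.1) + 1)).sum
decreasing_by
  · exact drainDecSkip lo hi rest
  · rename_i h _; exact drainDecPush s lo hi rest h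

def checkNum (num : Int) : Int :=
  let binstr := padBin num
  drain binstr [(0, binstr.length)] 1

def solution_alt (numbers : List Int) : List Int :=
  numbers.map checkNum

-- ===== PRECONDITION & SPEC =====
def Spec_solution (numbers : List Int) (out : List Int) : Prop := out = solution_alt numbers
instance (numbers : List Int) (out : List Int) : Decidable (Spec_solution numbers out) := by unfold Spec_solution; infer_instance

-- ===== CLAIM (what is proved, stated in full; the proofs are below) =====
def Claim_equal_solution : Prop := ∀ (numbers : List Int), Dom_solution numbers → Spec_solution numbers (solution numbers)

-- ===== LEMMAS AND PROOFS =====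

-- the "bad node somewhere" predicate underlying both programs, phrased on A's sublists
def badA (b : List Char) : Bool :=
  if b.length = 1 ∨ (PySem.Set.ofList b).length = 1 then false
  else if b = [] then false
  else
    let mid := b.length / 2
    if b.getD mid ' ' = '0' then true
    else badA (b.take mid) || badA (b.drop (mid + 1))
termination_by b.length
decreasing_by
  · rename_i hb _; exact pyTakeDec b hb
  · rename_i hb _; exact pyDropDec b hb

theorem binsearch_eq_badA (b : List Char) (st : Int) :
    binsearch b st = if badA b then 0 else st := by
  suffices H : ∀ (L : Nat) (b : List Char) (st : Int), b.length = L →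
      binsearch b st = if badA b then 0 else st from H b.length b st rfl
  intro L
  induction L using Nat.strong_induction_on with
  | _ L ih =>
    intro b st hL
    by_cases h1 : b.length = 1 ∨ (PySem.Set.ofList b).length = 1
    · rw [binsearch, badA]; simp [h1]
    · by_cases h2 : b = []
      · rw [binsearch, badA]; simp [h2]
      · have hpos : 0 < b.length := List.length_pos_iff.mpr h2
        by_cases h3 : b.getD (b.length / 2) ' ' = '0'
        · rw [binsearch, badA]
          simp only [if_neg h1, if_neg h2, if_pos h3]
          simp
        · rw [binsearch, badA]
          simp only [if_neg h1, if_neg h2, if_neg h3]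
          rw [ih (b.take (b.length / 2)).length (by simp; omega) _ st rfl,
              ih (b.drop (b.length / 2 + 1)).length (by simp; omega) _ _ rfl]
          by_cases hA : badA (b.take (b.length / 2)) <;>
            by_cases hB : badA (b.drop (b.length / 2 + 1)) <;> simp [hA, hB]

def segR (s : List Char) (lo hi : Nat) : List Char := (s.drop lo).take (hi - lo)

theorem len_segR {s : List Char} {lo hi : Nat} (hhs : hi ≤ s.length) :
    (segR s lo hi).length = hi - lo := by
  simp [segR]; omega

theorem getD_segR {s : List Char} {lo hi k : Nat} (hk : k < hi - lo) (hhs : hi ≤ s.length) :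
    (segR s lo hi).getD k ' ' = s.getD (lo + k) ' ' := by
  have h1 : k < s.length - lo := by omega
  have h2 : lo + k < s.length := by omega
  simp [segR, List.getD_eq_getElem?_getD, hk, List.getElem?_drop,
    List.getElem?_eq_getElem h2]

theorem nodup_all_eq {α : Type} {l : List α} {a : α} (hn : l.Nodup) (hne : l ≠ [])
    (ha : ∀ x ∈ l, x = a) : l = [a] := by
  match l with
  | [] => exact absurd rfl hne
  | x :: t =>
    have hx : x = a := ha x (by simp)
    have ht : t = [] := by
      cases t with
      | nil => rfl
      | cons y u =>
        have hy : y = a := ha y (by simp)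
        rw [List.nodup_cons] at hn
        exact absurd (by simp [hx, hy] : x ∈ y :: u) hn.1
    simp [hx, ht]

theorem setLen_one_iff (b : List Char) :
    (PySem.Set.ofList b).length = 1 ↔ b ≠ [] ∧ ∀ c ∈ b, c = b.getD 0 ' ' := by
  constructor
  · intro h
    obtain ⟨a, ha⟩ := List.length_eq_one_iff.mp h
    have hmem : ∀ c ∈ b, c = a := by
      intro c hc
      have : c ∈ PySem.Set.ofList b := (PySem.Set.mem_ofList b c).mpr hc
      simpa [ha] using this
    have hne : b ≠ [] := by
      intro hnil; simp [hnil, PySem.Set.ofList_nil] at h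
    refine ⟨hne, fun c hc => ?_⟩
    cases b with
    | nil => exact absurd rfl hne
    | cons x t => rw [hmem c hc]; simp [hmem x (by simp)]
  · rintro ⟨hne, hall⟩
    have : PySem.Set.ofList b = [b.getD 0 ' '] := by
      apply nodup_all_eq (PySem.Set.nodup_ofList b)
      · cases b with
        | nil => exact absurd rfl hne
        | cons x t => simp [PySem.Set.ofList_cons]
      · intro x hx; exact hall x ((PySem.Set.mem_ofList b x).mp hx)
    simp [this]

theorem count_eq_iff_all (l : List Char) (c : Char) (n : Nat) (hl : l.length = n) :
    ((l.count c == n) = true) ↔ ∀ b ∈ l, c = b := by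
  rw [beq_iff_eq, ← hl, List.count_eq_length]

theorem allSeg_iff_setLen {s : List Char} {lo hi : Nat} (hlh : lo < hi) (hhs : hi ≤ s.length) :
    allSeg s lo hi = true ↔ (PySem.Set.ofList (segR s lo hi)).length = 1 := by
  have hlen : (segR s lo hi).length = hi - lo := len_segR hhs
  have hne : segR s lo hi ≠ [] := by
    intro h; rw [h] at hlen; simp at hlen; omega
  have hhead : (segR s lo hi).getD 0 ' ' = s.getD (lo + 0) ' ' := getD_segR (by omega) hhs
  have hA : allSeg s lo hi = true ↔ ∀ b ∈ segR s lo hi, s.getD lo ' ' = b :=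
    count_eq_iff_all (segR s lo hi) (s.getD lo ' ') (hi - lo) hlen
  rw [setLen_one_iff, hA]
  constructor
  · intro h
    refine ⟨hne, fun c hc => ?_⟩
    rw [hhead]
    simpa using (h c hc).symm
  · rintro ⟨-, hall⟩
    intro b hb
    have := hall b hb
    rw [hhead] at this
    simpa using this.symm

-- one skipped range is never bad
theorem badA_segR_skip {s : List Char} {lo hi : Nat} (hhs : hi ≤ s.length)
    (h : hi - lo = 1 ∨ allSeg s lo hi = true) : badA (segR s lo hi) = false := by
  rcases Nat.lt_or_ge lo hi with h0 | h0
  · have hlen : (segR s lo hi).length = hi - lo := len_segR hhs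
    rcases h with h | h
    · rw [badA]; simp [hlen, h]
    · rw [badA]; simp [(allSeg_iff_setLen h0 hhs).mp h]
  · have hseg : segR s lo hi = [] :=
      List.length_eq_zero_iff.mp (by rw [len_segR hhs]; omega)
    rw [hseg, badA]; simp

-- unfolding badA on a split range
theorem badA_segR_split {s : List Char} {lo hi : Nat} (hhs : hi ≤ s.length)
    (h : ¬ (hi - lo = 1 ∨ allSeg s lo hi = true)) :
    badA (segR s lo hi) =
      (if s.getD (lo + (hi - lo) / 2) ' ' = '0' then true
       else badA (segR s lo (lo + (hi - lo) / 2)) || badA (segR s (lo + (hi - lo) / 2 + 1) hi)) := by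
  have h2 : lo + 1 ≤ hi := allSeg_false_lt (fun hh => h (Or.inr hh))
  have h1 : ¬ hi - lo = 1 := fun hh => h (Or.inl hh)
  have hn2 : 2 ≤ hi - lo := by omega
  have hlen : (segR s lo hi).length = hi - lo := len_segR hhs
  have hsl : ¬ (PySem.Set.ofList (segR s lo hi)).length = 1 :=
    fun hh => h (Or.inr ((allSeg_iff_setLen (by omega) hhs).mpr hh))
  have hne : segR s lo hi ≠ [] := by
    intro hh; rw [hh] at hlen; simp at hlen; omega
  have hmid : (segR s lo hi).getD ((hi - lo) / 2) ' ' = s.getD (lo + (hi - lo) / 2) ' ' :=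
    getD_segR (by omega) hhs
  have htake : (segR s lo hi).take ((hi - lo) / 2) = segR s lo (lo + (hi - lo) / 2) := by
    simp [segR, List.take_take]; omega
  have hdrop : (segR s lo hi).drop ((hi - lo) / 2 + 1) = segR s (lo + (hi - lo) / 2 + 1) hi := by
    simp only [segR, List.drop_take, List.drop_drop]
    congr 1
    all_goals omega
  rw [badA, if_neg (show ¬((segR s lo hi).length = 1 ∨
        (PySem.Set.ofList (segR s lo hi)).length = 1) by simp only [hlen]; simp [h1, hsl]),
      if_neg hne]
  simp only [hlen, hmid, htake, hdrop]

-- the stack drain computes "0 iff some range on the stack is bad"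
theorem drain_char (s : List Char) (stack : List (Nat × Nat)) (ok : Int)
    (hinv : ∀ p ∈ stack, p.1 ≤ p.2 ∧ p.2 ≤ s.length) :
    drain s stack ok = if stack.any (fun p => badA (segR s p.1 p.2)) then 0 else ok := by
  fun_induction drain s stack ok with
  | case1 => simp
  | case2 lo hi rest n h ih =>
    have hp2 : hi ≤ s.length := (hinv (lo, hi) (by simp)).2
    have h' : hi - lo = 1 ∨ allSeg s lo hi = true := h
    rw [ih (fun p hp => hinv p (by simp [hp]))]
    refine if_congr ?_ rfl rfl
    simp only [List.any_cons]
    rw [badA_segR_skip hp2 h']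
    simp
  | case3 lo hi rest n h mid hmid =>
    have hp2 : hi ≤ s.length := (hinv (lo, hi) (by simp)).2
    have h' : ¬ (hi - lo = 1 ∨ allSeg s lo hi = true) := h
    have hmid' : s.getD (lo + (hi - lo) / 2) ' ' = '0' := hmid
    have hb : badA (segR s lo hi) = true := by
      rw [badA_segR_split hp2 h', if_pos hmid']
    simp [hb]
  | case4 lo hi rest n h mid hmid ih =>
    have hp2 : hi ≤ s.length := (hinv (lo, hi) (by simp)).2
    have h' : ¬ (hi - lo = 1 ∨ allSeg s lo hi = true) := h
    have hmid' : ¬ s.getD (lo + (hi - lo) / 2) ' ' = '0' := hmid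
    have h2 : lo + 1 ≤ hi := allSeg_false_lt (fun hh => h' (Or.inr hh))
    have hm : mid = lo + (hi - lo) / 2 := rfl
    rw [hm] at ih ⊢
    have hinv' : ∀ p ∈ ((lo + (hi - lo) / 2 + 1, hi) :: (lo, lo + (hi - lo) / 2) :: rest),
        p.1 ≤ p.2 ∧ p.2 ≤ s.length := by
      intro p hp'
      simp only [List.mem_cons] at hp'
      rcases hp' with rfl | rfl | hp'
      · exact ⟨by omega, hp2⟩
      · exact ⟨by omega, by omega⟩
      · exact hinv p (by simp [hp'])
    rw [ih hinv']
    have hsplit : badA (segR s lo hi) =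
        (badA (segR s lo (lo + (hi - lo) / 2)) || badA (segR s (lo + (hi - lo) / 2 + 1) hi)) := by
      rw [badA_segR_split hp2 h', if_neg hmid']
    refine if_congr ?_ rfl rfl
    simp only [List.any_cons]
    rw [hsplit]
    simp [Bool.or_assoc, Bool.or_left_comm]

theorem checkNum_eq (num : Int) : binsearch (padBin num) 1 = checkNum num := by
  have h := drain_char (padBin num) [(0, (padBin num).length)] 1 (by simp)
  rw [checkNum]
  simp only [h, List.any_cons, List.any_nil, Bool.or_false]
  rw [binsearch_eq_badA]
  simp [segR]

-- ===== VERDICT (by name: the statement is the Claim_ definition above) =====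
theorem solution_spec : Claim_equal_solution := by
  intro numbers _
  unfold Spec_solution solution solution_alt
  rw [PySem.List.foldl_append_singleton_eq_map]
  exact List.map_congr_left (fun num _ => checkNum_eq num)
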